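-- pv_equiv track=rewrite | github.com/a-peyrard/aoc-2020 | aoc/day17/conway_cubes_part2.py | _init_empty_pocket
-- ===== SOURCE A (Python) =====
-- from typing import List, Tuple
--
-- PocketDimension = List[List[List[List[bool]]]]
--
-- def _init_empty_pocket(pocket: PocketDimension) -> PocketDimension:
--     return [
--         [
--             [
--                 [False] * len(pocket[w][z][y])
--                 for y in range(len(pocket[w][z]))
--             ]
--             for z in range(len(pocket[w]))
--         ]
--         for w in range(len(pocket))
--     ]
-- ===== SOURCE B (Python) =====
-- from typing import List
--
-- PocketDimension = List[List[List[List[bool]]]]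
--
--
-- def _blank(x):
--     """Recursively rebuild the nested-list shape with False at every leaf."""
--     if isinstance(x, list):
--         return [_blank(e) for e in x]
--     return False
--
--
-- def _init_empty_pocket(pocket: PocketDimension) -> PocketDimension:
--     return _blank(pocket)
-- ===== Notes on version B (the rewrite author's own statement) =====
-- stated objective: simpler
-- what changed: Replaces the fixed 4-level index-based comprehension (range/len/indexing plus [False]*len) with a single generic recursive shape-map that rebuilds the nested lists and turns each leaf into False.
import Mathlib
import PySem

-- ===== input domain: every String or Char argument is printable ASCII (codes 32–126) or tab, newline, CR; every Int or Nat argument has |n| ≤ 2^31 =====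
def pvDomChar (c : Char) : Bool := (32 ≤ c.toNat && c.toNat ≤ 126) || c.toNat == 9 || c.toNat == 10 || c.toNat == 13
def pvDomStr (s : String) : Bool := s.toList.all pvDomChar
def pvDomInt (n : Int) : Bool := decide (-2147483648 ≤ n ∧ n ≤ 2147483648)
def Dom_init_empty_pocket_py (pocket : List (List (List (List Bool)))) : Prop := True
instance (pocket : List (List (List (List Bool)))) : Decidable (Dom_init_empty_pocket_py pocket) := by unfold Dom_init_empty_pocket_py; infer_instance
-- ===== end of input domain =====

-- B replaces A's fixed 4-level range/len/index comprehension with a generic recursive shape-map (objective: simpler); same return value on all inputs.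

-- ===== PORT A =====
-- Literal port of A: [[[ [False]*len(pocket[w][z][y]) for y in range(len(pocket[w][z])) ] for z in range(len(pocket[w])) ] for w in range(len(pocket))]
def init_empty_pocket_py (pocket : List (List (List (List Bool)))) : List (List (List (List Bool))) :=
  (PySem.List.pyRange 0 (PySem.List.len pocket)).map (fun w =>
    let pw := PySem.List.pyGetD pocket w []
    (PySem.List.pyRange 0 (PySem.List.len pw)).map (fun z =>
      let pz := PySem.List.pyGetD pw z []
      (PySem.List.pyRange 0 (PySem.List.len pz)).map (fun y =>
        List.replicate (PySem.List.pyGetD pz y []).length false)))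

-- ===== PORT B =====
-- Port of B: a generic recursive shape-map; in this fixed nested-list type the recursion
-- unfolds into one map per level, with each leaf Bool mapped to false.
def blank_leaf (_ : Bool) : Bool := false
def blank1 (x : List Bool) : List Bool := x.map blank_leaf
def blank2 (x : List (List Bool)) : List (List Bool) := x.map blank1
def blank3 (x : List (List (List Bool))) : List (List (List Bool)) := x.map blank2
def init_empty_pocket_py_alt (pocket : List (List (List (List Bool)))) : List (List (List (List Bool))) :=
  pocket.map blank3

-- ===== PRECONDITION & SPEC =====
def Spec_init_empty_pocket_py (pocket : List (List (List (List Bool)))) (out : List (List (List (List Bool)))) : Prop := out = init_empty_pocket_py_alt pocket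
instance (pocket : List (List (List (List Bool)))) (out : List (List (List (List Bool)))) : Decidable (Spec_init_empty_pocket_py pocket out) := by unfold Spec_init_empty_pocket_py; infer_instance

-- ===== CLAIM (what is proved, stated in full; the proofs are below) =====
def Claim_equal_init_empty_pocket_py : Prop := ∀ (pocket : List (List (List (List Bool)))), Dom_init_empty_pocket_py pocket → Spec_init_empty_pocket_py pocket (init_empty_pocket_py pocket)

-- ===== LEMMAS AND PROOFS =====

-- each index-comprehension level equals a direct map over the list
theorem map_range_index {α β : Type} (xs : List α) (d : α) (f : α → β) :
    (PySem.List.pyRange 0 (PySem.List.len xs)).map (fun i => f (PySem.List.pyGetD xs i d)) =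
      xs.map f := by
  have h := PySem.List.map_pyGetD_pyRange_zero xs d
  calc (PySem.List.pyRange 0 (PySem.List.len xs)).map (fun i => f (PySem.List.pyGetD xs i d))
      = ((PySem.List.pyRange 0 (PySem.List.len xs)).map (fun i => PySem.List.pyGetD xs i d)).map f := by
        rw [List.map_map]; rfl
    _ = xs.map f := by rw [h]

theorem replicate_eq_blank1 (y : List Bool) : List.replicate y.length false = blank1 y := by
  induction y with
  | nil => rfl
  | cons b t ih => simp [List.replicate, blank1, blank_leaf, List.map] at *; exact ih

theorem portA_eq (pocket : List (List (List (List Bool)))) :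
    init_empty_pocket_py pocket = init_empty_pocket_py_alt pocket := by
  unfold init_empty_pocket_py init_empty_pocket_py_alt
  rw [map_range_index pocket [] (fun pw =>
    (PySem.List.pyRange 0 (PySem.List.len pw)).map (fun z =>
      let pz := PySem.List.pyGetD pw z []
      (PySem.List.pyRange 0 (PySem.List.len pz)).map (fun y =>
        List.replicate (PySem.List.pyGetD pz y []).length false)))]
  apply List.map_congr_left; intro pw _
  rw [map_range_index pw [] (fun pz =>
    (PySem.List.pyRange 0 (PySem.List.len pz)).map (fun y =>
      List.replicate (PySem.List.pyGetD pz y []).length false))]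
  show _ = blank3 pw
  unfold blank3
  apply List.map_congr_left; intro pz _
  rw [map_range_index pz [] (fun y => List.replicate y.length false)]
  show _ = blank2 pz
  unfold blank2
  apply List.map_congr_left; intro y _
  exact replicate_eq_blank1 y

-- ===== VERDICT (by name: the statement is the Claim_ definition above) =====
theorem init_empty_pocket_py_spec : Claim_equal_init_empty_pocket_py := by
  intro pocket _
  unfold Spec_init_empty_pocket_py
  exact (portA_eq pocket)
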